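-- pv_equiv track=rewrite | github.com/picccard/python-assignments | 02_anagram_string_list/02_anagram_solution2.py.py | getDiffString
-- ===== SOURCE A (Python) =====
-- import copy
--
-- def wordToCharDict(word):
--     # Counting instances of each char in word
--     word_count = {}
--     for char in word.lower():  # ignore case
--         word_count.setdefault(char, 0)
--         word_count[char] = word_count[char] + 1
--     return word_count
--
-- def getDiffString(word1, word2):
--     # We make a dict from the word,
--     # and makes a copy wich we can remove items from.
--     # This way our copy shall only containt items not in the other word
--     word1_dict_org = wordToCharDict(word1)
--     word1_diff = copy.deepcopy(word1_dict_org)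
--     word2_dict_org = wordToCharDict(word2)
--     word2_diff = copy.deepcopy(word2_dict_org)
--
--     # Just in word1:
--     for char in word2_dict_org.keys():
--         if char in word1_diff.keys():
--             the_sum = word1_diff[char] - word2_dict_org[char]
--             if the_sum > 0:
--                 word1_diff[char] = the_sum
--             else:
--                 word1_diff.pop(char) # Removes the char if the other word got more or the same amount
--
--     # Just in word2
--     for char in word1_dict_org.keys():
--         if char in word2_diff.keys():
--             the_sum = word2_diff[char] - word1_dict_org[char]
--             if the_sum > 0:
--                 word2_diff[char] = the_sum
--             else:
--                 word2_diff.pop(char) # Removes the char if the other word got more of the same amount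
--
--     return 'Just in A: {}\nJust in B: {}'.format(word1_diff, word2_diff)
-- ===== SOURCE B (Python) =====
-- def getDiffString(word1, word2):
--     # No count dicts at all: scan each lowercased word once and, at each
--     # character's FIRST occurrence, compare str.count on the two words.
--     def leftover(w, other):
--         out = {}
--         seen = []
--         for ch in w:
--             if ch not in seen:
--                 seen.append(ch)
--                 d = w.count(ch) - other.count(ch)
--                 if d > 0:
--                     out[ch] = d
--         return out
--     lw1 = word1.lower()
--     lw2 = word2.lower()
--     return 'Just in A: {}\nJust in B: {}'.format(leftover(lw1, lw2), leftover(lw2, lw1))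
-- ===== Notes on version B (the rewrite author's own statement) =====
-- stated objective: alternative
-- what changed: Eliminates the character-count dicts and the two subtract-and-pop loops entirely: B scans each lowercased word and, at each character's first occurrence, compares str.count over the two whole words to decide and compute the leftover entry.
import Mathlib
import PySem

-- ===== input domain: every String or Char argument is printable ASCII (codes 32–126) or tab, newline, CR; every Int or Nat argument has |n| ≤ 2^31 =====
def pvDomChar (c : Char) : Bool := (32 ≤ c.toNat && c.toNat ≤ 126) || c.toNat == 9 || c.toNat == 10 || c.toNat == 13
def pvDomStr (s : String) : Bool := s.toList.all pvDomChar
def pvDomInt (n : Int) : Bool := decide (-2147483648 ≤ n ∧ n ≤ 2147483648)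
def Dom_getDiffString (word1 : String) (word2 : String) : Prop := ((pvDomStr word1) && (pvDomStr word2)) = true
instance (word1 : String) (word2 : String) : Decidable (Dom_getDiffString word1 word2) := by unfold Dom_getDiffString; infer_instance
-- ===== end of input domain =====

-- B drops the count dicts and the two subtract-and-pop loops: it scans each lowercased word
-- and, at each character's first occurrence, compares str.count over the two words (alternative
-- decomposition; same result, no speed claim).

-- Hand port of Python's repr() of a one-character string, exact for printable ASCII plus tab/newline/CR
-- (the only characters the stated domain admits); shared by both ports as the port of str(dict).
def pyReprChar (c : Char) : List Char :=
  if c = '\'' then ['"', '\'', '"']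
  else if c = '\\' then ['\'', '\\', '\\', '\'']
  else if c = '\t' then ['\'', '\\', 't', '\'']
  else if c = '\n' then ['\'', '\\', 'n', '\'']
  else if c = Char.ofNat 13 then ['\'', '\\', 'r', '\'']
  else ['\'', c, '\'']

-- Hand port of Python's str() on a char-keyed dict given its items in order; exact on the stated domain.
def pyDictRepr (l : List (Char × Int)) : List Char :=
  '{' :: (List.intercalate [',', ' ']
    (l.map (fun p => pyReprChar p.1 ++ ':' :: ' ' :: PySem.Int.toChars p.2))) ++ ['}']

-- ===== PORT A =====
def wordToCharDict (word : String) : PySem.Dict Char Int :=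
  (PySem.Str.lower word).toList.foldl (fun d c =>
    let d := d.setdefault c 0          -- word_count.setdefault(char, 0)
    d.insert c (d.getD c 0 + 1))       -- word_count[char] = word_count[char] + 1
    PySem.Dict.empty

-- body of A's two (textually identical) subtract-and-pop loops; `sub` is the other word's dict
def subStep (sub : PySem.Dict Char Int) (d : PySem.Dict Char Int) (ch : Char) : PySem.Dict Char Int :=
  if d.contains ch then
    let theSum := d.getD ch 0 - sub.getD ch 0
    if theSum > 0 then d.insert ch theSum else d.erase ch
  else d

def getDiffString (word1 : String) (word2 : String) : String :=
  let word1_dict_org := wordToCharDict word1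
  let word1_diff := word1_dict_org                -- copy.deepcopy
  let word2_dict_org := wordToCharDict word2
  let word2_diff := word2_dict_org                -- copy.deepcopy
  let word1_diff := word2_dict_org.keys.foldl (subStep word2_dict_org) word1_diff
  let word2_diff := word1_dict_org.keys.foldl (subStep word1_dict_org) word2_diff
  String.ofList ("Just in A: ".toList ++ pyDictRepr word1_diff.items
             ++ "\nJust in B: ".toList ++ pyDictRepr word2_diff.items)

-- ===== PORT B =====
-- leftover(w, other): one scan of w keeping a `seen` list and an output dict;
-- at a first occurrence, d = w.count(ch) - other.count(ch) (str.count of a single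
-- char = List.count on the char list, exact), kept if d > 0.
def altLeftover (w other : List Char) : PySem.Dict Char Int :=
  (w.foldl (fun (st : PySem.Dict Char Int × List Char) ch =>
      if ch ∈ st.2 then st
      else
        let seen := st.2 ++ [ch]                 -- seen.append(ch)
        let d : Int := (w.count ch : Int) - (other.count ch : Int)
        if d > 0 then (st.1.insert ch d, seen) else (st.1, seen))
    (PySem.Dict.empty, [])).1

def getDiffString_alt (word1 : String) (word2 : String) : String :=
  let lw1 := (PySem.Str.lower word1).toList
  let lw2 := (PySem.Str.lower word2).toList
  String.ofList ("Just in A: ".toList ++ pyDictRepr (altLeftover lw1 lw2).items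
             ++ "\nJust in B: ".toList ++ pyDictRepr (altLeftover lw2 lw1).items)

-- ===== PRECONDITION & SPEC =====
def Spec_getDiffString (word1 : String) (word2 : String) (out : String) : Prop := out = getDiffString_alt word1 word2
instance (word1 : String) (word2 : String) (out : String) : Decidable (Spec_getDiffString word1 word2 out) := by unfold Spec_getDiffString; infer_instance

-- ===== CLAIM (what is proved, stated in full; the proofs are below) =====
def Claim_equal_getDiffString : Prop := ∀ (word1 : String) (word2 : String), Dom_getDiffString word1 word2 → Spec_getDiffString word1 word2 (getDiffString word1 word2)

-- ===== LEMMAS AND PROOFS =====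

-- the per-key leftover entry, as A's loop leaves it
def gMinus (sub : PySem.Dict Char Int) (p : Char × Int) : Option (Char × Int) :=
  if sub.getD p.1 0 < p.2 then some (p.1, p.2 - sub.getD p.1 0) else none

-- the per-key leftover entry, as B computes it from raw counts
def gCount (w other : List Char) (c : Char) : Option (Char × Int) :=
  let d : Int := (w.count c : Int) - (other.count c : Int)
  if d > 0 then some (c, d) else none

-- what B's scan emits on suffix t given the chars already seen
def specLeft (g : Char → Option (Char × Int)) (s : List Char) : List Char → List (Char × Int)
  | [] => []
  | c :: t =>
      if c ∈ s then specLeft g s t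
      else
        match g c with
        | some p => p :: specLeft g (s ++ [c]) t
        | none => specLeft g (s ++ [c]) t

-- what A's loop does to one item, parameterised by the set of keys still to be processed
def predKs (sub : PySem.Dict Char Int) (ks : List Char) (p : Char × Int) : Option (Char × Int) :=
  if p.1 ∈ ks then gMinus sub p else some p

theorem wordToCharDict_eq_counter (w : String) :
    wordToCharDict w = PySem.Dict.counter (PySem.Str.lower w).toList := by
  have hstep : (fun (d : PySem.Dict Char Int) (c : Char) =>
      let d := d.setdefault c 0
      d.insert c (d.getD c 0 + 1))
      = fun d c => d.insert c (d.getD c 0 + 1) := by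
    funext d c
    by_cases h : d.contains c = true
    · simp [PySem.Dict.setdefault_of_contains _ _ h]
    · simp only [Bool.not_eq_true] at h
      simp [PySem.Dict.setdefault_of_not_contains _ _ h,
        PySem.Dict.getD_insert_self, PySem.Dict.getD_of_not_contains _ _ h,
        PySem.Dict.insert_insert_self]
  unfold wordToCharDict
  rw [hstep, PySem.Dict.foldl_insert_getD_add_one_eq_counter]

theorem nodup_keys_erase (d : PySem.Dict Char Int) (k : Char) (h : d.keys.Nodup) :
    (d.erase k).keys.Nodup := by
  simp only [PySem.Dict.keys, PySem.Dict.erase] at *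
  exact h.sublist (List.filter_sublist.map _)

theorem items_subStep (sub d : PySem.Dict Char Int) (k : Char) (hd : d.keys.Nodup) :
    (subStep sub d k).items
      = d.items.filterMap (fun p => if p.1 = k then gMinus sub p else some p) := by
  unfold subStep
  by_cases hc : d.contains k = true
  · obtain ⟨v, hv⟩ : ∃ v, d.get? k = some v := by
      rw [PySem.Dict.contains_eq_isSome_get?] at hc
      exact Option.isSome_iff_exists.mp hc
    have hgd : d.getD k 0 = v := PySem.Dict.getD_of_get?_eq_some _ _ hv
    by_cases hs : (0:Int) < v - sub.getD k 0
    · simp only [hc, if_true, hgd, hs]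
      rw [PySem.Dict.items_insert_of_contains _ _ hc, ← List.filterMap_eq_map]
      apply List.filterMap_congr
      intro p hp
      by_cases hpk : p.1 = k
      · have hpv : p.2 = v := by
          have := PySem.Dict.get?_of_mem_items (d := d) (k := p.1) (v := p.2)
            (by simpa using hp) hd
          rw [hpk, hv] at this; exact (Option.some_inj.mp this).symm
        have : sub.getD p.1 0 < p.2 := by rw [hpk, hpv]; omega
        simp [gMinus, hpk, hpv]
        omega
      · simp [hpk]
    · simp only [hc, if_true, hgd, hs, if_false]
      show (List.filter _ d.items) = _
      rw [← List.filterMap_eq_filter]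
      apply List.filterMap_congr
      intro p hp
      by_cases hpk : p.1 = k
      · have hpv : p.2 = v := by
          have := PySem.Dict.get?_of_mem_items (d := d) (k := p.1) (v := p.2)
            (by simpa using hp) hd
          rw [hpk, hv] at this; exact (Option.some_inj.mp this).symm
        have hnlt : ¬ sub.getD p.1 0 < p.2 := by rw [hpk, hpv]; omega
        simp [gMinus, hpk, hpv, Option.guard]
        omega
      · simp [hpk, Option.guard, show (p.1 == k) = false by simp [hpk]]
  · simp only [Bool.not_eq_true] at hc
    simp only [hc, Bool.false_eq_true, if_false]
    have : ∀ p ∈ d.items, p.1 ≠ k := by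
      intro p hp hpk
      have : p.1 ∈ d.keys := PySem.Dict.mem_keys_of_mem_items _ hp
      rw [hpk] at this
      rw [← PySem.Dict.contains_iff_mem_keys] at this
      simp [hc] at this
    rw [List.filterMap_congr (g := some) (by intro p hp; simp [this p hp])]
    simp

theorem nodup_keys_subStep (sub d : PySem.Dict Char Int) (k : Char) (hd : d.keys.Nodup) :
    (subStep sub d k).keys.Nodup := by
  by_cases h1 : d.contains k = true
  · by_cases h2 : d.getD k 0 - sub.getD k 0 > 0
    · have h2' : sub.getD k 0 < d.getD k 0 := by omega
      simpa [subStep, h1, h2'] using PySem.Dict.nodup_keys_insert _ k _ hd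
    · have h2' : ¬ sub.getD k 0 < d.getD k 0 := by omega
      simpa [subStep, h1, h2'] using nodup_keys_erase d k hd
  · simpa [subStep, h1] using hd

theorem loop_items (sub : PySem.Dict Char Int) :
    ∀ (ks : List Char), ks.Nodup → ∀ (d : PySem.Dict Char Int), d.keys.Nodup →
    (ks.foldl (subStep sub) d).items = d.items.filterMap (predKs sub ks) := by
  intro ks
  induction ks with
  | nil =>
    intro _ d _
    simp [predKs]
  | cons k ks ih =>
    intro hnd d hd
    have hk : k ∉ ks := (List.nodup_cons.mp hnd).1
    rw [List.foldl_cons, ih (List.nodup_cons.mp hnd).2 _ (nodup_keys_subStep sub d k hd),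
      items_subStep sub d k hd, List.filterMap_filterMap]
    apply List.filterMap_congr
    intro p _
    rcases p with ⟨pk, pv⟩
    by_cases hpk : pk = k
    · subst hpk
      by_cases hg : sub.getD pk 0 < pv
      · simp [predKs, gMinus, hg, hk]
      · simp [predKs, gMinus, hg]
    · by_cases hm : pk ∈ ks
      · simp [predKs, gMinus, hpk, hm]
      · simp [predKs, gMinus, hpk, hm]

theorem pos_of_mem_counter_items (l : List Char) (p : Char × Int)
    (hp : p ∈ (PySem.Dict.counter l).items) : 0 < p.2 := by
  rw [PySem.Dict.items_counter] at hp
  obtain ⟨x, hx, hxp⟩ := List.mem_map.mp hp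
  rw [PySem.Set.mem_ofList] at hx
  subst hxp
  simpa using List.count_pos_iff.mpr hx

-- A's loop computes exactly the positive count differences, item by item
theorem diff_eq_filterMap (l1 l2 : List Char) :
    ((PySem.Dict.counter l2).keys.foldl (subStep (PySem.Dict.counter l2))
        (PySem.Dict.counter l1)).items
      = (PySem.Dict.counter l1).items.filterMap (gMinus (PySem.Dict.counter l2)) := by
  rw [loop_items _ _ (PySem.Dict.nodup_keys_counter l2) _ (PySem.Dict.nodup_keys_counter l1)]
  apply List.filterMap_congr
  intro p hp
  by_cases hm : p.1 ∈ (PySem.Dict.counter l2).keys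
  · simp only [predKs]
    rw [if_pos hm]
  · have hc : (PySem.Dict.counter l2).contains p.1 = false := by
      rw [← Bool.not_eq_true, PySem.Dict.contains_iff_mem_keys]; exact hm
    have h0 : (PySem.Dict.counter l2).getD p.1 0 = 0 :=
      PySem.Dict.getD_of_not_contains _ _ hc
    have hpos : 0 < p.2 := pos_of_mem_counter_items l1 p hp
    simp only [predKs]
    rw [if_neg hm]
    simp [gMinus, h0, hpos]

-- B's fold, with `seen` generalised; the invariant says every key of the dict was seen
theorem altLeftover_fold (w other : List Char) (t : List Char) :
    ∀ (st : PySem.Dict Char Int × List Char), (∀ k ∈ st.1.keys, k ∈ st.2) →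
    ((t.foldl (fun (st : PySem.Dict Char Int × List Char) ch =>
        if ch ∈ st.2 then st
        else
          let seen := st.2 ++ [ch]
          let d : Int := (w.count ch : Int) - (other.count ch : Int)
          if d > 0 then (st.1.insert ch d, seen) else (st.1, seen)) st).1).items
      = st.1.items ++ specLeft (gCount w other) st.2 t := by
  induction t with
  | nil => intro st _; simp [specLeft]
  | cons c t ih =>
    intro st hinv
    rcases st with ⟨d, s⟩
    by_cases hc : c ∈ s
    · simpa [hc, specLeft] using ih (d, s) hinv
    · have hfresh : d.contains c = false := by
        rw [← Bool.not_eq_true, PySem.Dict.contains_iff_mem_keys]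
        intro hk; exact hc (hinv c hk)
      by_cases hpos : ((w.count c : Int) - (other.count c : Int)) > 0
      · have := ih (d.insert c ((w.count c : Int) - (other.count c : Int)), s ++ [c])
          (by
            intro k hk
            rcases (PySem.Dict.mem_keys_insert _ _ _ _).mp hk with h | h
            · simp [h]
            · exact List.mem_append_left _ (hinv k h))
        simp only [List.foldl_cons, hc, if_false, if_pos hpos, if_neg hc] at this ⊢
        rw [this, PySem.Dict.items_insert_of_not_contains _ _ hfresh]
        have hlt : other.count c < w.count c := by omega
        simp [specLeft, hc, gCount, hpos, hlt]
      · have := ih (d, s ++ [c])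
          (by intro k hk; exact List.mem_append_left _ (hinv k hk))
        simp only [List.foldl_cons, hc, if_false, if_neg hpos, if_neg hc] at this ⊢
        rw [this]
        have hnlt : ¬ other.count c < w.count c := by omega
        simp [specLeft, hc, gCount, hpos, hnlt]

-- B's scan emits g at each first occurrence not yet seen
theorem specLeft_eq_filterMap (g : Char → Option (Char × Int)) (l : List Char) :
    ∀ (s : List Char), specLeft g s l
      = ((PySem.Set.ofList l).filter (fun c => !(s.contains c))).filterMap g := by
  induction l with
  | nil => intro s; simp [specLeft, PySem.Set.ofList_nil]
  | cons c t ih =>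
    intro s
    rw [PySem.Set.ofList_cons]
    by_cases hc : c ∈ s
    · have hcc : s.contains c = true := by simpa using hc
      rw [show specLeft g s (c :: t) = specLeft g s t from by simp only [specLeft, if_pos hc], ih s]
      congr 1
      rw [List.filter_cons_of_neg (by simp [hc])]
      rw [show PySem.Set.discard (PySem.Set.ofList t) c
            = (PySem.Set.ofList t).filter (fun y => !(y == c)) from rfl,
        List.filter_filter]
      apply List.filter_congr
      intro a _
      by_cases hac : a = c
      · subst hac; simp [hc]
      · simp [hac]
    · have hcc : s.contains c = false := by simpa using hc
      have hrest : specLeft g (s ++ [c]) t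
          = ((PySem.Set.ofList t).filter (fun y => !(s.contains y) && !(y == c))).filterMap g := by
        rw [ih (s ++ [c])]
        congr 1
        apply List.filter_congr
        intro a _
        by_cases hac : a = c
        · subst hac; simp
        · simp [hac]
      have hfc : (List.filter (fun c_1 => !s.contains c_1)
            (c :: PySem.Set.discard (PySem.Set.ofList t) c))
          = c :: (PySem.Set.ofList t).filter (fun y => !(s.contains y) && !(y == c)) := by
        rw [List.filter_cons_of_pos (by simp [hc])]
        rw [show PySem.Set.discard (PySem.Set.ofList t) c
              = (PySem.Set.ofList t).filter (fun y => !(y == c)) from rfl,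
          List.filter_filter]
      rw [hfc]
      cases hg : g c with
      | none =>
        rw [show specLeft g s (c :: t) = specLeft g (s ++ [c]) t from by
          simp only [specLeft, if_neg hc, hg], hrest]
        simp [List.filterMap_cons, hg]
      | some p =>
        rw [show specLeft g s (c :: t) = p :: specLeft g (s ++ [c]) t from by
          simp only [specLeft, if_neg hc, hg], hrest]
        simp [List.filterMap_cons, hg]

-- the two per-character entries agree
theorem gMinus_count (l1 l2 : List Char) (c : Char) :
    gMinus (PySem.Dict.counter l2) (c, (l1.count c : Int)) = gCount l1 l2 c := by
  simp only [gMinus, gCount, PySem.Dict.getD_counter]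
  by_cases h : (l2.count c : Int) < (l1.count c : Int)
  · rw [if_pos h, if_pos (by omega)]
  · rw [if_neg h, if_neg (by omega)]

-- A's per-side result equals B's per-side result
theorem side_eq (l1 l2 : List Char) :
    ((PySem.Dict.counter l2).keys.foldl (subStep (PySem.Dict.counter l2))
        (PySem.Dict.counter l1)).items = (altLeftover l1 l2).items := by
  rw [diff_eq_filterMap, PySem.Dict.items_counter, List.filterMap_map]
  unfold altLeftover
  rw [altLeftover_fold l1 l2 l1 (PySem.Dict.empty, []) (by simp [PySem.Dict.keys_empty]),
    specLeft_eq_filterMap]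
  rw [show (PySem.Dict.empty : PySem.Dict Char Int).items = [] from rfl, List.nil_append]
  rw [show (List.filter (fun c => !(List.contains ([] : List Char) c)) (PySem.Set.ofList l1))
        = PySem.Set.ofList l1 from by simp]
  apply List.filterMap_congr
  intro c _
  exact gMinus_count l1 l2 c

-- ===== VERDICT (by name: the statement is the Claim_ definition above) =====
theorem getDiffString_spec : Claim_equal_getDiffString := by
  intro word1 word2 _
  unfold Spec_getDiffString getDiffString getDiffString_alt
  simp only [wordToCharDict_eq_counter]
  rw [side_eq, side_eq]
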